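-- pv_equiv track=rewrite | github.com/UhlConsultingLLC/Sygnomics_ORACLE | scripts/import_civic_evidence.py | _therapy_class_from_therapies
-- ===== SOURCE A (Python) =====
-- def _therapy_class_from_therapies(therapies: str, biomarker: str) -> str:
--     """Best-effort mapping of therapy names to therapy class."""
--     tl = therapies.lower()
--
--     if "temozolomide" in tl or "carmustine" in tl or "pcv" in tl or "lomustine" in tl:
--         return "Alkylating Agent"
--     if "dabrafenib" in tl or "vemurafenib" in tl or "tovorafenib" in tl:
--         if "trametinib" in tl:
--             return "BRAF inhibitor + MEK inhibitor"
--         return "BRAF inhibitor"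
--     if "trametinib" in tl or "selumetinib" in tl or "cobimetinib" in tl or "binimetinib" in tl:
--         return "MEK inhibitor"
--     if "vorasidenib" in tl:
--         return "IDH inhibitor"
--     if "ivosidenib" in tl:
--         return "IDH inhibitor"
--     if "enasidenib" in tl:
--         return "IDH inhibitor"
--     if "entrectinib" in tl or "larotrectinib" in tl:
--         return "NTRK inhibitor"
--     if "crizotinib" in tl or "alectinib" in tl or "lorlatinib" in tl or "ceritinib" in tl or "brigatinib" in tl:
--         return "ALK inhibitor"
--     if "erlotinib" in tl or "gefitinib" in tl or "afatinib" in tl or "osimertinib" in tl or "dacomitinib" in tl: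
--         return "EGFR inhibitor"
--     if "rindopepimut" in tl:
--         return "Cancer Vaccine"
--     if "bevacizumab" in tl:
--         return "Angiogenesis Inhibitor"
--     if "nivolumab" in tl or "pembrolizumab" in tl or "atezolizumab" in tl:
--         return "Immune Checkpoint Inhibitor"
--     if "palbociclib" in tl or "ribociclib" in tl or "abemaciclib" in tl:
--         return "CDK inhibitor"
--     if "olaparib" in tl or "niraparib" in tl or "pamiparib" in tl:
--         return "PARP inhibitor"
--     if "dordaviprone" in tl or "onc201" in tl or "onc-201" in tl:
--         return "DRD2 antagonist / ClpP agonist"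
--     if "erdafitinib" in tl or "infigratinib" in tl or "pemigatinib" in tl or "futibatinib" in tl:
--         return "FGFR inhibitor"
--     if "capmatinib" in tl or "tepotinib" in tl:
--         return "MET inhibitor"
--     if "alpelisib" in tl or "buparlisib" in tl or "inavolisib" in tl:
--         return "PI3K inhibitor"
--     if "everolimus" in tl:
--         return "mTOR inhibitor"
--     if "imatinib" in tl or "sunitinib" in tl or "dasatinib" in tl:
--         return "Kinase Inhibitor"
--
--     # Fallback based on biomarker
--     biomarker_class_hints = {
--         "EGFR": "EGFR inhibitor",
--         "BRAF": "BRAF inhibitor",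
--         "IDH": "IDH inhibitor",
--         "NTRK": "NTRK inhibitor",
--         "ALK": "ALK inhibitor",
--         "ROS1": "ROS1 inhibitor",
--         "FGFR": "FGFR inhibitor",
--         "MET": "MET inhibitor",
--     }
--     for keyword, cls in biomarker_class_hints.items():
--         if keyword in biomarker.upper():
--             return cls
--
--     return ""
-- ===== SOURCE B (Python) =====
-- # B: instead of an early-return cascade, collect ALL matching keywords in one
-- # comprehension pass and select the winner by min() over rule priority.
--
-- _GROUPS = [
--     (("temozolomide", "carmustine", "pcv", "lomustine"), "Alkylating Agent"),
--     (("dabrafenib", "vemurafenib", "tovorafenib"), "BRAF inhibitor"),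
--     (("trametinib", "selumetinib", "cobimetinib", "binimetinib"), "MEK inhibitor"),
--     (("vorasidenib", "ivosidenib", "enasidenib"), "IDH inhibitor"),
--     (("entrectinib", "larotrectinib"), "NTRK inhibitor"),
--     (("crizotinib", "alectinib", "lorlatinib", "ceritinib", "brigatinib"), "ALK inhibitor"),
--     (("erlotinib", "gefitinib", "afatinib", "osimertinib", "dacomitinib"), "EGFR inhibitor"),
--     (("rindopepimut",), "Cancer Vaccine"),
--     (("bevacizumab",), "Angiogenesis Inhibitor"),
--     (("nivolumab", "pembrolizumab", "atezolizumab"), "Immune Checkpoint Inhibitor"),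
--     (("palbociclib", "ribociclib", "abemaciclib"), "CDK inhibitor"),
--     (("olaparib", "niraparib", "pamiparib"), "PARP inhibitor"),
--     (("dordaviprone", "onc201", "onc-201"), "DRD2 antagonist / ClpP agonist"),
--     (("erdafitinib", "infigratinib", "pemigatinib", "futibatinib"), "FGFR inhibitor"),
--     (("capmatinib", "tepotinib"), "MET inhibitor"),
--     (("alpelisib", "buparlisib", "inavolisib"), "PI3K inhibitor"),
--     (("everolimus",), "mTOR inhibitor"),
--     (("imatinib", "sunitinib", "dasatinib"), "Kinase Inhibitor"),
-- ]
--
-- # keyword -> (priority, class), flattened once at module load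
-- _KW = {k: (i, cls) for i, (kws, cls) in enumerate(_GROUPS) for k in kws}
--
-- _HINTS = {
--     "EGFR": "EGFR inhibitor",
--     "BRAF": "BRAF inhibitor",
--     "IDH": "IDH inhibitor",
--     "NTRK": "NTRK inhibitor",
--     "ALK": "ALK inhibitor",
--     "ROS1": "ROS1 inhibitor",
--     "FGFR": "FGFR inhibitor",
--     "MET": "MET inhibitor",
-- }
--
--
-- def _therapy_class_from_therapies(therapies: str, biomarker: str) -> str:
--     """Best-effort mapping of therapy names to therapy class."""
--     tl = therapies.lower()
--     matched = [v for k, v in _KW.items() if k in tl]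
--     if matched:
--         cls = min(matched, key=lambda pc: pc[0])[1]
--         if cls == "BRAF inhibitor" and "trametinib" in tl:
--             return "BRAF inhibitor + MEK inhibitor"
--         return cls
--     bu = biomarker.upper()
--     hits = [c for k, c in _HINTS.items() if k in bu]
--     return hits[0] if hits else ""
-- ===== Notes on version B (the rewrite author's own statement) =====
-- stated objective: alternative
-- what changed: A is a 20-branch early-return cascade; B flattens the rules into a keyword->(priority,class) map built once, collects ALL matching keywords in a single comprehension pass and selects the winner with min() by priority (the BRAF+MEK combo is a post-check on the winning class), with the biomarker fallback as a filter-then-first instead of a loop.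
import Mathlib
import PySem

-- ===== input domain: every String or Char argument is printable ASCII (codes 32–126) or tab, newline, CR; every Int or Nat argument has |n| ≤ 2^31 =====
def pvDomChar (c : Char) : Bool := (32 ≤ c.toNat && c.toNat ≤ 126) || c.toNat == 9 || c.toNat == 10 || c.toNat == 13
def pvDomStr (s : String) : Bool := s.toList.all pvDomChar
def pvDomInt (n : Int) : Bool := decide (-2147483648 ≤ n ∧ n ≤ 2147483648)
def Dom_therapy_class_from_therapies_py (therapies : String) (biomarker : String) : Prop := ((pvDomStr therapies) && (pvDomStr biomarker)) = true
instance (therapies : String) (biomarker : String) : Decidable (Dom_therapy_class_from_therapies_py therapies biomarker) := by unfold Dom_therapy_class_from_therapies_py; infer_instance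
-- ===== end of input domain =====

-- B replaces A's early-return cascade by a collect-all-matches pass over a flattened
-- keyword->(priority,class) map with min()-by-priority selection (objective: alternative).

-- ===== PORT A =====
def therapy_class_from_therapies_py (therapies : String) (biomarker : String) : String :=
  let tl := PySem.Str.lower therapies
  if PySem.Str.isIn "temozolomide" tl || PySem.Str.isIn "carmustine" tl || PySem.Str.isIn "pcv" tl || PySem.Str.isIn "lomustine" tl then
    "Alkylating Agent"
  else if PySem.Str.isIn "dabrafenib" tl || PySem.Str.isIn "vemurafenib" tl || PySem.Str.isIn "tovorafenib" tl then
    (if PySem.Str.isIn "trametinib" tl then "BRAF inhibitor + MEK inhibitor" else "BRAF inhibitor")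
  else if PySem.Str.isIn "trametinib" tl || PySem.Str.isIn "selumetinib" tl || PySem.Str.isIn "cobimetinib" tl || PySem.Str.isIn "binimetinib" tl then
    "MEK inhibitor"
  else if PySem.Str.isIn "vorasidenib" tl then "IDH inhibitor"
  else if PySem.Str.isIn "ivosidenib" tl then "IDH inhibitor"
  else if PySem.Str.isIn "enasidenib" tl then "IDH inhibitor"
  else if PySem.Str.isIn "entrectinib" tl || PySem.Str.isIn "larotrectinib" tl then "NTRK inhibitor"
  else if PySem.Str.isIn "crizotinib" tl || PySem.Str.isIn "alectinib" tl || PySem.Str.isIn "lorlatinib" tl || PySem.Str.isIn "ceritinib" tl || PySem.Str.isIn "brigatinib" tl then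
    "ALK inhibitor"
  else if PySem.Str.isIn "erlotinib" tl || PySem.Str.isIn "gefitinib" tl || PySem.Str.isIn "afatinib" tl || PySem.Str.isIn "osimertinib" tl || PySem.Str.isIn "dacomitinib" tl then
    "EGFR inhibitor"
  else if PySem.Str.isIn "rindopepimut" tl then "Cancer Vaccine"
  else if PySem.Str.isIn "bevacizumab" tl then "Angiogenesis Inhibitor"
  else if PySem.Str.isIn "nivolumab" tl || PySem.Str.isIn "pembrolizumab" tl || PySem.Str.isIn "atezolizumab" tl then
    "Immune Checkpoint Inhibitor"
  else if PySem.Str.isIn "palbociclib" tl || PySem.Str.isIn "ribociclib" tl || PySem.Str.isIn "abemaciclib" tl then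
    "CDK inhibitor"
  else if PySem.Str.isIn "olaparib" tl || PySem.Str.isIn "niraparib" tl || PySem.Str.isIn "pamiparib" tl then
    "PARP inhibitor"
  else if PySem.Str.isIn "dordaviprone" tl || PySem.Str.isIn "onc201" tl || PySem.Str.isIn "onc-201" tl then
    "DRD2 antagonist / ClpP agonist"
  else if PySem.Str.isIn "erdafitinib" tl || PySem.Str.isIn "infigratinib" tl || PySem.Str.isIn "pemigatinib" tl || PySem.Str.isIn "futibatinib" tl then
    "FGFR inhibitor"
  else if PySem.Str.isIn "capmatinib" tl || PySem.Str.isIn "tepotinib" tl then "MET inhibitor"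
  else if PySem.Str.isIn "alpelisib" tl || PySem.Str.isIn "buparlisib" tl || PySem.Str.isIn "inavolisib" tl then
    "PI3K inhibitor"
  else if PySem.Str.isIn "everolimus" tl then "mTOR inhibitor"
  else if PySem.Str.isIn "imatinib" tl || PySem.Str.isIn "sunitinib" tl || PySem.Str.isIn "dasatinib" tl then
    "Kinase Inhibitor"
  else
    -- A's final `for keyword, cls in biomarker_class_hints.items(): if keyword in biomarker.upper(): return cls`
    pvHintLoopA (PySem.Str.upper biomarker)
      [("EGFR", "EGFR inhibitor"), ("BRAF", "BRAF inhibitor"), ("IDH", "IDH inhibitor"),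
       ("NTRK", "NTRK inhibitor"), ("ALK", "ALK inhibitor"), ("ROS1", "ROS1 inhibitor"),
       ("FGFR", "FGFR inhibitor"), ("MET", "MET inhibitor")]
where
  pvHintLoopA (bu : String) : List (String × String) → String
    | [] => ""
    | (kw, cls) :: rest => if PySem.Str.isIn kw bu then cls else pvHintLoopA bu rest

-- ===== PORT B =====
def pvGroups : List (List String × String) :=
  [(["temozolomide", "carmustine", "pcv", "lomustine"], "Alkylating Agent"),
   (["dabrafenib", "vemurafenib", "tovorafenib"], "BRAF inhibitor"),
   (["trametinib", "selumetinib", "cobimetinib", "binimetinib"], "MEK inhibitor"),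
   (["vorasidenib", "ivosidenib", "enasidenib"], "IDH inhibitor"),
   (["entrectinib", "larotrectinib"], "NTRK inhibitor"),
   (["crizotinib", "alectinib", "lorlatinib", "ceritinib", "brigatinib"], "ALK inhibitor"),
   (["erlotinib", "gefitinib", "afatinib", "osimertinib", "dacomitinib"], "EGFR inhibitor"),
   (["rindopepimut"], "Cancer Vaccine"),
   (["bevacizumab"], "Angiogenesis Inhibitor"),
   (["nivolumab", "pembrolizumab", "atezolizumab"], "Immune Checkpoint Inhibitor"),
   (["palbociclib", "ribociclib", "abemaciclib"], "CDK inhibitor"),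
   (["olaparib", "niraparib", "pamiparib"], "PARP inhibitor"),
   (["dordaviprone", "onc201", "onc-201"], "DRD2 antagonist / ClpP agonist"),
   (["erdafitinib", "infigratinib", "pemigatinib", "futibatinib"], "FGFR inhibitor"),
   (["capmatinib", "tepotinib"], "MET inhibitor"),
   (["alpelisib", "buparlisib", "inavolisib"], "PI3K inhibitor"),
   (["everolimus"], "mTOR inhibitor"),
   (["imatinib", "sunitinib", "dasatinib"], "Kinase Inhibitor")]

-- Source B's `_KW = {k: (i, cls) for i, (kws, cls) in enumerate(_GROUPS) for k in kws}`
-- (keys are pairwise distinct, so the dict comprehension is this flattened assoc list)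
def pvKW : List (String × (Int × String)) :=
  (PySem.List.enumerate pvGroups).flatMap (fun ig => ig.2.1.map (fun k => (k, (ig.1, ig.2.2))))

def pvHints : List (String × String) :=
  [("EGFR", "EGFR inhibitor"), ("BRAF", "BRAF inhibitor"), ("IDH", "IDH inhibitor"),
   ("NTRK", "NTRK inhibitor"), ("ALK", "ALK inhibitor"), ("ROS1", "ROS1 inhibitor"),
   ("FGFR", "FGFR inhibitor"), ("MET", "MET inhibitor")]

def therapy_class_from_therapies_py_alt (therapies : String) (biomarker : String) : String :=
  let tl := PySem.Str.lower therapies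
  -- matched = [v for k, v in _KW.items() if k in tl]
  let matched := (pvKW.filter (fun kv => PySem.Str.isIn kv.1 tl)).map (·.2)
  match PySem.List.min? matched (fun pc => pc.1) with
  | some pc =>
    if pc.2 == "BRAF inhibitor" && PySem.Str.isIn "trametinib" tl then
      "BRAF inhibitor + MEK inhibitor"
    else pc.2
  | none =>
    let bu := PySem.Str.upper biomarker
    -- hits = [c for k, c in _HINTS.items() if k in bu]; hits[0] if hits else ""
    let hits := (pvHints.filter (fun kc => PySem.Str.isIn kc.1 bu)).map (·.2)
    (hits.head?).getD ""

-- ===== PRECONDITION & SPEC =====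
def Spec_therapy_class_from_therapies_py (therapies : String) (biomarker : String) (out : String) : Prop := out = therapy_class_from_therapies_py_alt therapies biomarker
instance (therapies : String) (biomarker : String) (out : String) : Decidable (Spec_therapy_class_from_therapies_py therapies biomarker out) := by unfold Spec_therapy_class_from_therapies_py; infer_instance

-- ===== CLAIM =====
def Claim_equal_therapy_class_from_therapies_py : Prop := ∀ (therapies : String) (biomarker : String), Dom_therapy_class_from_therapies_py therapies biomarker → Spec_therapy_class_from_therapies_py therapies biomarker (therapy_class_from_therapies_py therapies biomarker)

-- ===== LEMMAS AND PROOFS =====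

-- the relation along pvKW's values: priorities nondecreasing, and equal priority forces equal pair
def pvR (p q : Int × String) : Prop := p.1 ≤ q.1 ∧ (p.1 = q.1 → p = q)

-- min?-by-priority of a pvR-pairwise list is its head
lemma min?_eq_head (xs : List (Int × String)) (h : xs.Pairwise pvR) :
    PySem.List.min? xs (fun pc => pc.1) = xs.head? := by
  cases xs with
  | nil => simp [PySem.List.min?_eq_none_iff]
  | cons a t =>
    cases hm : PySem.List.min? (a :: t) (fun pc => pc.1) with
    | none => exact absurd ((PySem.List.min?_eq_none_iff _ _).1 hm) (by simp)
    | some m =>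
      have hmem := PySem.List.min?_mem hm
      have hmin := PySem.List.min?_isMin hm a (by simp)
      rcases List.mem_cons.1 hmem with rfl | hmt
      · rfl
      · have hR : pvR a m := (List.pairwise_cons.1 h).1 m hmt
        have : a = m := hR.2 (le_antisymm hR.1 hmin)
        simp [this]

lemma pvKW_pairwise : pvKW.Pairwise (fun a b => pvR a.2 b.2) := by
  unfold pvKW pvGroups pvR; decide

-- first-match loop over the groups, generic in the keyword predicate
-- (proof-side characterisation of B's filter+min)
def pvFirstQ (p : String → Bool) : Int → List (List String × String) → Option (Int × String)
  | _, [] => none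
  | n, (kws, cls) :: rest =>
    if kws.any p then some (n, cls) else pvFirstQ p (n + 1) rest

lemma head_filter_map_group (p : String → Bool) (n : Int) (cls : String) (kws : List String) :
    ((((kws.map (fun k => (k, (n, cls)))).filter (fun kv => p kv.1)).map (·.2)).head?)
      = (if kws.any p then some (n, cls) else none) := by
  induction kws with
  | nil => simp
  | cons k rest ih =>
    simp only [List.map_cons, List.filter_cons, List.any_cons]
    by_cases hk : p k = true
    · simp [hk]
    · simp only [hk, Bool.false_eq_true, if_false, Bool.or_eq_true, false_or]
      simp [ih]

lemma head_filter_flatMap (p : String → Bool) (groups : List (List String × String)) (n : Int) :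
    ((((PySem.List.enumerate groups n).flatMap
        (fun ig => ig.2.1.map (fun k => (k, (ig.1, ig.2.2))))).filter
          (fun kv => p kv.1)).map (·.2)).head? = pvFirstQ p n groups := by
  induction groups generalizing n with
  | nil => simp [PySem.List.enumerate_nil, pvFirstQ]
  | cons g rest ih =>
    obtain ⟨kws, cls⟩ := g
    rw [PySem.List.enumerate_cons]
    simp only [List.flatMap_cons, List.filter_append, List.map_append, List.head?_append]
    rw [head_filter_map_group, ih]
    simp only [pvFirstQ]
    by_cases h : kws.any p = true
    · simp [h]
    · have h' : kws.any p = false := by simpa using h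
      simp [h']

-- first-hit loop over the hints, generic in the predicate
def pvHintQ (q : String × String → Bool) : List (String × String) → String
  | [] => ""
  | kc :: rest => if q kc then kc.2 else pvHintQ q rest

lemma hint_head_eq_hintQ (q : String × String → Bool) (hints : List (String × String)) :
    (((hints.filter q).map (·.2)).head?).getD "" = pvHintQ q hints := by
  induction hints with
  | nil => simp [pvHintQ]
  | cons kc rest ih =>
    simp only [List.filter_cons, pvHintQ]
    by_cases hk : q kc = true
    · simp [hk]
    · rw [if_neg hk, if_neg hk]; exact ih

lemma hintQ_eq_loopA (bu : String) (hints : List (String × String)) :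
    pvHintQ (fun kc => PySem.Str.isIn kc.1 bu) hints
      = therapy_class_from_therapies_py.pvHintLoopA bu hints := by
  induction hints with
  | nil => rfl
  | cons kc rest ih =>
    obtain ⟨kw, cls⟩ := kc
    simp only [pvHintQ, therapy_class_from_therapies_py.pvHintLoopA]
    rw [ih]

lemma matched_pairwise (tl : String) :
    ((pvKW.filter (fun kv => PySem.Str.isIn kv.1 tl)).map (·.2)).Pairwise pvR :=
  List.pairwise_map.2 (pvKW_pairwise.sublist List.filter_sublist)

-- B's selection step, as a named function (so the chain comparison is match-free)
def pvFinish (tram : Bool) (hintv : String) : Option (Int × String) → String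
  | some pc => if pc.2 == "BRAF inhibitor" && tram then "BRAF inhibitor + MEK inhibitor" else pc.2
  | none => hintv

lemma pvFinish_ite (tram : Bool) (hintv : String) (c : Prop) [Decidable c]
    (a b : Option (Int × String)) :
    pvFinish tram hintv (if c then a else b)
      = if c then pvFinish tram hintv a else pvFinish tram hintv b :=
  apply_ite (pvFinish tram hintv) c a b

lemma alt_eq_first (therapies biomarker : String) :
    therapy_class_from_therapies_py_alt therapies biomarker =
      pvFinish (PySem.Str.isIn "trametinib" (PySem.Str.lower therapies))
        (therapy_class_from_therapies_py.pvHintLoopA (PySem.Str.upper biomarker) pvHints)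
        (pvFirstQ (fun k => PySem.Str.isIn k (PySem.Str.lower therapies)) 0 pvGroups) := by
  simp only [therapy_class_from_therapies_py_alt]
  rw [min?_eq_head _ (matched_pairwise (PySem.Str.lower therapies))]
  rw [show pvKW = (PySem.List.enumerate pvGroups).flatMap
        (fun ig => ig.2.1.map (fun k => (k, (ig.1, ig.2.2)))) from rfl]
  rw [head_filter_flatMap (fun k => PySem.Str.isIn k (PySem.Str.lower therapies))]
  cases h : pvFirstQ (fun k => PySem.Str.isIn k (PySem.Str.lower therapies)) 0 pvGroups with
  | some pc => rfl
  | none => simp only [hint_head_eq_hintQ, hintQ_eq_loopA, pvFinish]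

-- A's cascade against B's first-match over pvGroups, with the substring test abstracted
set_option maxHeartbeats 1000000 in
lemma chain_eq (p : String → Bool) (tram : Bool) (hintv : String) :
    (if p "temozolomide" || p "carmustine" || p "pcv" || p "lomustine" then
      "Alkylating Agent"
    else if p "dabrafenib" || p "vemurafenib" || p "tovorafenib" then
      (if tram then "BRAF inhibitor + MEK inhibitor" else "BRAF inhibitor")
    else if p "trametinib" || p "selumetinib" || p "cobimetinib" || p "binimetinib" then
      "MEK inhibitor"
    else if p "vorasidenib" then "IDH inhibitor"
    else if p "ivosidenib" then "IDH inhibitor"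
    else if p "enasidenib" then "IDH inhibitor"
    else if p "entrectinib" || p "larotrectinib" then "NTRK inhibitor"
    else if p "crizotinib" || p "alectinib" || p "lorlatinib" || p "ceritinib" || p "brigatinib" then
      "ALK inhibitor"
    else if p "erlotinib" || p "gefitinib" || p "afatinib" || p "osimertinib" || p "dacomitinib" then
      "EGFR inhibitor"
    else if p "rindopepimut" then "Cancer Vaccine"
    else if p "bevacizumab" then "Angiogenesis Inhibitor"
    else if p "nivolumab" || p "pembrolizumab" || p "atezolizumab" then
      "Immune Checkpoint Inhibitor"
    else if p "palbociclib" || p "ribociclib" || p "abemaciclib" then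
      "CDK inhibitor"
    else if p "olaparib" || p "niraparib" || p "pamiparib" then
      "PARP inhibitor"
    else if p "dordaviprone" || p "onc201" || p "onc-201" then
      "DRD2 antagonist / ClpP agonist"
    else if p "erdafitinib" || p "infigratinib" || p "pemigatinib" || p "futibatinib" then
      "FGFR inhibitor"
    else if p "capmatinib" || p "tepotinib" then "MET inhibitor"
    else if p "alpelisib" || p "buparlisib" || p "inavolisib" then
      "PI3K inhibitor"
    else if p "everolimus" then "mTOR inhibitor"
    else if p "imatinib" || p "sunitinib" || p "dasatinib" then
      "Kinase Inhibitor"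
    else hintv) =
      pvFinish tram hintv (pvFirstQ p 0 pvGroups) := by
  simp only [pvGroups, pvFirstQ, pvFinish_ite, List.any_cons, List.any_nil,
    Bool.or_false, Bool.or_assoc]
  simp only [pvFinish, String.reduceBEq, Bool.false_and, Bool.true_and,
    Bool.false_eq_true, if_false]
  by_cases hv : p "vorasidenib" = true
  · simp only [hv, if_true, Bool.true_or]
  · have hv' : p "vorasidenib" = false := by simpa using hv
    by_cases hi : p "ivosidenib" = true
    · simp only [hv', hi, if_true, if_false, Bool.true_or, Bool.false_or,
        Bool.false_eq_true]
    · have hi' : p "ivosidenib" = false := by simpa using hi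
      by_cases he : p "enasidenib" = true
      · simp only [hv', hi', he, if_true, if_false,
          Bool.false_or, Bool.false_eq_true]
      · have he' : p "enasidenib" = false := by simpa using he
        simp only [hv', hi', he', if_false, Bool.false_or, Bool.false_eq_true]

-- ===== VERDICT =====
set_option maxHeartbeats 1000000 in
theorem therapy_class_from_therapies_py_spec : Claim_equal_therapy_class_from_therapies_py := by
  intro t b _
  unfold Spec_therapy_class_from_therapies_py
  rw [alt_eq_first,
    ← chain_eq (fun k => PySem.Str.isIn k (PySem.Str.lower t))
      (PySem.Str.isIn "trametinib" (PySem.Str.lower t))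
      (therapy_class_from_therapies_py.pvHintLoopA (PySem.Str.upper b) pvHints)]
  rfl
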